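-- pv_equiv track=rewrite | github.com/zapatacomputing/benchq | bars_overlap.py | overlapping_intervals
-- ===== SOURCE A (Python) =====
-- def overlapping_intervals(n):
--     overlapping_cases = 0
--     for start1 in range(1, n):  # Start point of the first interval
--         for end1 in range(start1, n):  # End point of the first interval
--             for start2 in range(1, n):  # Start point of the second interval
--                 for end2 in range(start2, n):  # End point of the second interval
--                     # Check if the intervals overlap
--                     if start2 <= end1 and start1 <= end2:
--                         overlapping_cases += 1
--     return overlapping_cases
-- ===== SOURCE B (Python) =====
-- def overlapping_intervals(n):
--     # Closed form: intervals [s, e] with 1 <= s <= e <= m, m = n - 1.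
--     # Total ordered pairs minus the disjoint ones (2 * C(m+2, 4)).
--     m = n - 1
--     if m <= 0:
--         return 0
--     return (3 * m * m * (m + 1) ** 2 - (m + 2) * (m + 1) * m * (m - 1)) // 12
-- ===== Notes on version B (the rewrite author's own statement) =====
-- stated objective: faster
-- what changed: Replaced the quartic nested loops by an O(1) closed-form polynomial (total pairs minus disjoint pairs via inclusion-exclusion).
import Mathlib
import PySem

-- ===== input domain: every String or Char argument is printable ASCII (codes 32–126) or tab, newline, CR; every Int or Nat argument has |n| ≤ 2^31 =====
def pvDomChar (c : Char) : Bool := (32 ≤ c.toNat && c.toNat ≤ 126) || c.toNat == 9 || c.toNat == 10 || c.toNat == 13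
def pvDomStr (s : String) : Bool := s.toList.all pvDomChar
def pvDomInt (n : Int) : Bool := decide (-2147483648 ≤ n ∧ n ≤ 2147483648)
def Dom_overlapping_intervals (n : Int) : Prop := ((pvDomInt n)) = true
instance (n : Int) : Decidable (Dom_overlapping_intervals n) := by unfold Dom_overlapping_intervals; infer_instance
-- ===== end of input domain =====

-- B replaces A's O(n^4) quadruple loop by an O(1) closed-form polynomial
-- (total interval pairs minus the disjoint pairs, by inclusion-exclusion).

-- ===== PORT A =====
def overlapping_intervals (n : Int) : Int :=
  (PySem.List.pyRange 1 n 1).foldl (fun acc1 start1 =>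
    (PySem.List.pyRange start1 n 1).foldl (fun acc2 end1 =>
      (PySem.List.pyRange 1 n 1).foldl (fun acc3 start2 =>
        (PySem.List.pyRange start2 n 1).foldl (fun acc4 end2 =>
          if start2 ≤ end1 ∧ start1 ≤ end2 then acc4 + 1 else acc4) acc3) acc2) acc1) 0

-- ===== PORT B =====
def overlapping_intervals_alt (n : Int) : Int :=
  let m := n - 1
  if m ≤ 0 then 0
  else PySem.Int.floordiv (3 * m * m * (m + 1) ^ 2 - (m + 2) * (m + 1) * m * (m - 1)) 12

-- ===== PRECONDITION & SPEC =====
def Spec_overlapping_intervals (n : Int) (out : Int) : Prop := out = overlapping_intervals_alt n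
instance (n : Int) (out : Int) : Decidable (Spec_overlapping_intervals n out) := by unfold Spec_overlapping_intervals; infer_instance

-- ===== CLAIM (what is proved, stated in full; the proofs are below) =====
def Claim_equal_overlapping_intervals : Prop := ∀ (n : Int), Dom_overlapping_intervals n → Spec_overlapping_intervals n (overlapping_intervals n)

-- ===== LEMMAS AND PROOFS =====

/-- Sum of `f` over the integer range `[a, b)`. -/
def pvS (a b : Int) (f : Int → Int) : Int := ((PySem.List.pyRange a b 1).map f).sum

theorem pvS_congr {a b : Int} {f g : Int → Int}
    (h : ∀ x, a ≤ x → x < b → f x = g x) : pvS a b f = pvS a b g := by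
  unfold pvS
  apply congrArg
  apply List.map_congr_left
  intro x hx
  rcases (PySem.List.mem_pyRange_one).1 hx with ⟨h1, h2⟩
  exact h x h1 h2

theorem pvS_mul (c a b : Int) (f : Int → Int) :
    c * pvS a b f = pvS a b (fun x => c * f x) := by
  unfold pvS
  generalize PySem.List.pyRange a b 1 = l
  induction l with
  | nil => simp
  | cons x t ih => simp [ih, mul_add]

theorem pvS_split (a m b : Int) (f : Int → Int) (h1 : a ≤ m) (h2 : m ≤ b) :
    pvS a b f = pvS a m f + pvS m b f := by
  unfold pvS
  rw [PySem.List.pyRange_one_append a m b h1 h2, List.map_append, List.sum_append]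

theorem pvS_const (a b c : Int) : pvS a b (fun _ => c) = ((b - a).toNat : Int) * c := by
  unfold pvS
  rw [show ((PySem.List.pyRange a b 1).map (fun _ => c)) = List.replicate (PySem.List.pyRange a b 1).length c by
    simp]
  simp [List.sum_replicate, PySem.List.length_pyRange_one, mul_comm]

/-- Telescoping: if `F` is a discrete antiderivative of `f`, the range sum is `F b - F a`. -/
theorem pvTele (f F : Int → Int) (h : ∀ x, F (x + 1) = F x + f x) :
    ∀ (a b : Int), a ≤ b → pvS a b f = F b - F a := by
  intro a b hab
  obtain ⟨k, hk⟩ : ∃ k : Nat, b = a + (k : Int) := ⟨(b - a).toNat, by omega⟩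
  subst hk
  clear hab
  induction k with
  | zero => simp [pvS, PySem.List.pyRange_one_eq_nil (le_refl a)]
  | succ k ih =>
    have hb : a + ((k + 1 : Nat) : Int) = (a + (k : Int)) + 1 := by push_cast; ring
    rw [hb]
    unfold pvS at ih ⊢
    rw [PySem.List.pyRange_one_succ_right (by omega : a ≤ a + (k : Int)),
        List.map_append, List.sum_append, ih, h (a + (k : Int))]
    simp
    ring

/-- Count of `x ∈ [a, b)` with `c ≤ x`. -/
theorem pvCnt (c : Int) : ∀ (a b : Int),
    (((PySem.List.pyRange a b 1).countP (fun x => decide (c ≤ x))) : Int) = max 0 (b - max a c) := by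
  intro a b
  by_cases hab : b ≤ a
  · rw [PySem.List.pyRange_one_eq_nil hab]
    simp only [List.countP_nil, Nat.cast_zero, Int.max_def]
    split_ifs <;> omega
  · obtain ⟨k, hk⟩ : ∃ k : Nat, b = a + (k : Int) := ⟨(b - a).toNat, by omega⟩
    subst hk
    clear hab
    induction k generalizing a with
    | zero =>
      rw [PySem.List.pyRange_one_eq_nil (by push_cast; omega)]
      simp only [List.countP_nil, Nat.cast_zero, Int.max_def]
      split_ifs <;> omega
    | succ k ih =>
      have hlt : a < a + ((k + 1 : Nat) : Int) := by push_cast; omega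
      have harg : a + ((k + 1 : Nat) : Int) = (a + 1) + (k : Int) := by push_cast; ring
      rw [PySem.List.pyRange_one_cons hlt, List.countP_cons, harg]
      have hih := ih (a + 1)
      by_cases hc : c ≤ a
      · simp only [hc, decide_true, if_pos]
        push_cast
        rw [hih]
        simp only [Int.max_def]
        split_ifs <;> omega
      · simp only [hc, decide_false]
        push_cast
        rw [hih]
        simp only [Int.max_def]
        split_ifs <;> omega

/-- Innermost loop of A: the number of `end2 ∈ [start2, n)` making the pair overlap. -/
theorem pvCnt2 (n s1 e1 s2 : Int) :
    (((PySem.List.pyRange s2 n 1).countP (fun e2 => decide (s2 ≤ e1 ∧ s1 ≤ e2))) : Int)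
    = if s2 ≤ e1 then max 0 (n - max s2 s1) else 0 := by
  by_cases h : s2 ≤ e1
  · rw [if_pos h]
    rw [show (fun e2 => decide (s2 ≤ e1 ∧ s1 ≤ e2)) = (fun e2 => decide (s1 ≤ e2)) by
      funext e2; simp [h]]
    exact pvCnt s1 s2 n
  · rw [if_neg h]
    rw [List.countP_eq_zero.mpr (fun x _ => by simp [h])]
    simp

/-- A's quadruple loop as a nested range sum over its two inner loops' closed count. -/
theorem A_as_sum (n : Int) : overlapping_intervals n
    = pvS 1 n (fun s1 => pvS s1 n (fun e1 =>
        pvS 1 n (fun s2 => if s2 ≤ e1 then max 0 (n - max s2 s1) else 0))) := by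
  unfold overlapping_intervals pvS
  simp only [PySem.List.foldl_ite_add_one, PySem.List.foldl_add, zero_add, pvCnt2]

/-- Closed form (doubled) of the `start2`/`end2` double loop, for fixed `s1 ≤ e1 < n`. -/
theorem pvG3 (n s1 e1 : Int) (h1 : 1 ≤ s1) (h2 : s1 ≤ e1) (h3 : e1 < n) :
    2 * pvS 1 n (fun s2 => if s2 ≤ e1 then max 0 (n - max s2 s1) else 0)
    = 2 * s1 * (n - s1) + (2 * n - s1 - e1 - 1) * (e1 - s1) := by
  rw [pvS_mul]
  rw [pvS_split 1 (e1 + 1) n _ (by omega) (by omega)]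
  have hz : pvS (e1 + 1) n (fun s2 => 2 * if s2 ≤ e1 then max 0 (n - max s2 s1) else 0)
      = pvS (e1 + 1) n (fun _ => (0 : Int)) := by
    apply pvS_congr; intro x hx _; rw [if_neg (by omega)]; ring
  rw [hz, pvS_const, mul_zero, add_zero]
  have h01 : pvS 1 (e1 + 1) (fun s2 => 2 * if s2 ≤ e1 then max 0 (n - max s2 s1) else 0)
      = pvS 1 (e1 + 1) (fun s2 => 2 * (n - max s2 s1)) := by
    apply pvS_congr; intro x hx1 hx2
    rw [if_pos (by omega)]
    congr 1
    rw [Int.max_def, Int.max_def]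
    split_ifs <;> omega
  rw [h01, pvS_split 1 (s1 + 1) (e1 + 1) _ (by omega) (by omega)]
  have ha : pvS 1 (s1 + 1) (fun s2 => 2 * (n - max s2 s1)) = pvS 1 (s1 + 1) (fun _ => 2 * (n - s1)) := by
    apply pvS_congr; intro x hx1 hx2
    congr 2
    rw [Int.max_def]; split_ifs <;> omega
  have hb : pvS (s1 + 1) (e1 + 1) (fun s2 => 2 * (n - max s2 s1)) = pvS (s1 + 1) (e1 + 1) (fun x => 2 * (n - x)) := by
    apply pvS_congr; intro x hx1 hx2
    congr 2
    rw [Int.max_def]; split_ifs <;> omega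
  rw [ha, hb, pvS_const,
      pvTele (fun x => 2 * (n - x)) (fun x => 2 * n * x - x * (x - 1)) (by intro x; ring)
        (s1 + 1) (e1 + 1) (by omega)]
  have hcast : ((s1 + 1 - 1).toNat : Int) = s1 := by omega
  rw [hcast]
  ring

/-- Closed form (×12) of A's three inner loops, for fixed `1 ≤ s1 < n`. -/
theorem pvG2 (n s1 : Int) (h1 : 1 ≤ s1) (h2 : s1 < n) :
    12 * pvS s1 n (fun e1 => pvS 1 n (fun s2 => if s2 ≤ e1 then max 0 (n - max s2 s1) else 0))
    = (6 * s1 * (1 - s1) * n + 3 * (2 * n - 1) * n * (n - 1) - n * (n - 1) * (2 * n - 1))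
      - (6 * s1 * (1 - s1) * s1 + 3 * (2 * n - 1) * s1 * (s1 - 1) - s1 * (s1 - 1) * (2 * s1 - 1)) := by
  rw [pvS_mul]
  have hc : pvS s1 n (fun e1 => 12 * pvS 1 n (fun s2 => if s2 ≤ e1 then max 0 (n - max s2 s1) else 0))
      = pvS s1 n (fun e1 => 6 * (2 * s1 * (n - s1) + (2 * n - s1 - e1 - 1) * (e1 - s1))) := by
    apply pvS_congr; intro e1 he1 he2
    have h3 := pvG3 n s1 e1 h1 he1 he2
    have h12 : (12 : Int) * pvS 1 n (fun s2 => if s2 ≤ e1 then max 0 (n - max s2 s1) else 0)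
        = 6 * (2 * pvS 1 n (fun s2 => if s2 ≤ e1 then max 0 (n - max s2 s1) else 0)) := by ring
    rw [h12, h3]
  rw [hc,
      pvTele (fun e1 => 6 * (2 * s1 * (n - s1) + (2 * n - s1 - e1 - 1) * (e1 - s1)))
        (fun x => 6 * s1 * (1 - s1) * x + 3 * (2 * n - 1) * x * (x - 1) - x * (x - 1) * (2 * x - 1))
        (by intro x; ring) s1 n (by omega)]

/-- Closed form (×144) of A's whole quadruple loop. -/
theorem pvTop (n : Int) (hn : 1 ≤ n) :
    144 * overlapping_intervals n
    = (24 * n ^ 2 * (n - 1) ^ 2 - (24 * n + 12) * n * (n - 1) * (2 * n - 1)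
        + (72 * n - 12) * n * (n - 1) + 24 * n * (n - 1) * (2 * n - 1) * n)
      - 24 * n * (n - 1) * (2 * n - 1) := by
  rw [A_as_sum, pvS_mul]
  have hc : pvS 1 n (fun s1 => 144 * pvS s1 n (fun e1 =>
        pvS 1 n (fun s2 => if s2 ≤ e1 then max 0 (n - max s2 s1) else 0)))
      = pvS 1 n (fun s1 => 12 * (
          (6 * s1 * (1 - s1) * n + 3 * (2 * n - 1) * n * (n - 1) - n * (n - 1) * (2 * n - 1))
          - (6 * s1 * (1 - s1) * s1 + 3 * (2 * n - 1) * s1 * (s1 - 1) - s1 * (s1 - 1) * (2 * s1 - 1)))) := by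
    apply pvS_congr; intro s1 hs1 hs2
    have hg := pvG2 n s1 hs1 hs2
    have h144 : (144 : Int) * pvS s1 n (fun e1 =>
          pvS 1 n (fun s2 => if s2 ≤ e1 then max 0 (n - max s2 s1) else 0))
        = 12 * (12 * pvS s1 n (fun e1 =>
          pvS 1 n (fun s2 => if s2 ≤ e1 then max 0 (n - max s2 s1) else 0))) := by ring
    rw [h144, hg]
  rw [hc,
      pvTele _ (fun x => 24 * x ^ 2 * (x - 1) ^ 2 - (24 * n + 12) * x * (x - 1) * (2 * x - 1)
          + (72 * n - 12) * x * (x - 1) + 24 * n * (n - 1) * (2 * n - 1) * x)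
        (by intro x; ring) 1 n hn]
  ring

-- ===== VERDICT (by name: the statement is the Claim_ definition above) =====
theorem overlapping_intervals_spec : Claim_equal_overlapping_intervals := by
  intro n _
  unfold Spec_overlapping_intervals overlapping_intervals_alt
  by_cases hn : n - 1 ≤ 0
  · simp only [hn, if_pos]
    unfold overlapping_intervals
    rw [PySem.List.pyRange_one_eq_nil (by omega : n ≤ 1)]
    rfl
  · rw [if_neg hn]
    have hTop := pvTop n (by omega)
    have hnum : (3 * (n - 1) * (n - 1) * ((n - 1) + 1) ^ 2
          - ((n - 1) + 2) * ((n - 1) + 1) * (n - 1) * ((n - 1) - 1))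
        = 12 * overlapping_intervals n := by
      have h12 : (12 : Int) * (3 * (n - 1) * (n - 1) * ((n - 1) + 1) ^ 2
            - ((n - 1) + 2) * ((n - 1) + 1) * (n - 1) * ((n - 1) - 1))
          = 12 * (12 * overlapping_intervals n) := by
        linear_combination -hTop
      exact mul_left_cancel₀ (by norm_num) h12
    rw [hnum, PySem.Int.floordiv_eq_ediv_of_pos (by norm_num)]
    exact (Int.mul_ediv_cancel_left _ (by norm_num)).symm
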